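-- pv_equiv track=rewrite | github.com/DamyanK/QR_Decoder | decoder.py | MaskPattern010
-- ===== SOURCE A (Python) =====
-- def MaskPattern010(matrix):
--     # This is for mask 010
--     # QR is split into 3 equal segments vertically
--
--     # 1/3
--     for i in range(round(len(matrix) / 3) + 2, 2 * round((len(matrix) / 3)) - 1):
--         for j in range(0, round(len(matrix) / 3) - 1, 3):
--             matrix[i][j] = matrix[i][j] ^ 1
--             #matrix[i][j] = 4
--
--     # 2/3
--     for i in range(0, len(matrix)):
--         for j in range(round(len(matrix) / 3) + 2, 2 * round((len(matrix) / 3)) - 1, 3):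
--             if i == round(len(matrix) / 3) - 1:
--                 continue
--             matrix[i][j] = matrix[i][j] ^ 1
--             #matrix[i][j] = 4
--
--     # 3/3
--     for i in range(round(len(matrix) / 3) + 2, len(matrix)):
--         for j in range(2 * round((len(matrix) / 3)) + 1, len(matrix), 3):
--             matrix[i][j] = matrix[i][j] ^ 1
--             #matrix[i][j] = 4
--
--     return matrix
-- ===== SOURCE B (Python) =====
-- def MaskPattern010(matrix):
--     # One uniform pass: flip each existing cell whose (row, col) index satisfies one of
--     # the three disjoint closed-form mask-band predicates (mutates matrix in place, like A).
--     n = len(matrix)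
--     t = round(n / 3)
--     for i in range(n):
--         row = matrix[i]
--         for j in range(len(row)):
--             if (t + 2 <= i < 2 * t - 1 and j < t - 1 and j % 3 == 0) \
--                or (t + 2 <= j < 2 * t - 1 and (j - (t + 2)) % 3 == 0 and i != t - 1) \
--                or (t + 2 <= i and 2 * t + 1 <= j < n and (j - (2 * t + 1)) % 3 == 0):
--                 row[j] ^= 1
--     return matrix
-- ===== Notes on version B (the rewrite author's own statement) =====
-- stated objective: alternative
-- what changed: Replaces A's three separate stepped-range double loops (which jump around the matrix) by a single uniform pass over every existing cell, flipping a cell exactly when it satisfies one of three disjoint closed-form band predicates; this also makes B total where A's indexing raises on short rows.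
import Mathlib
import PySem

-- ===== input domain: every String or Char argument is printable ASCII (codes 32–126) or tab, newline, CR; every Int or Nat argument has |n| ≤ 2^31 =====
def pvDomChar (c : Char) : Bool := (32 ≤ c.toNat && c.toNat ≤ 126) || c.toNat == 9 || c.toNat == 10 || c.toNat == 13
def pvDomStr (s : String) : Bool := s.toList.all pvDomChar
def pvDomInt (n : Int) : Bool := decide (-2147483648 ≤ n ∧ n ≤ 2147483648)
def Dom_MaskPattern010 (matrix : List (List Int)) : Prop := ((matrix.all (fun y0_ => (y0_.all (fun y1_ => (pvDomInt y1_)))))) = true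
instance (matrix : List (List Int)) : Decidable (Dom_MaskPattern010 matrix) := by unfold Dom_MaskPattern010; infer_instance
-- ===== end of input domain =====

-- B replaces A's three stepped-range double loops by one uniform pass over every existing
-- cell with a closed-form band predicate (alternative decomposition, same cost); both
-- Pythons mutate the argument in place, the equivalence proved is about the returned value.

-- ===== PORT A =====
-- helper: Python range(a, b, s) over naturals, s > 0 (empty when b ≤ a)
def pvStepRange (a b s : Nat) : List Nat :=
  (List.range ((b - a + s - 1) / s)).map (fun k => a + s * k)

-- helper: matrix[i][j] ^= 1; out of range it is a no-op, and Pre_ excludes exactly the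
-- inputs on which the Python indexing raises IndexError
def pvFlip (m : List (List Int)) (i j : Nat) : List (List Int) :=
  m.modify i (fun row => row.modify j (fun x => PySem.Int.bxor x 1))

-- the three loops of A, in order; n = len(matrix), t = round(n/3) = (n+1)/3 exactly
-- (n/3 is never a half-integer, so Python's round is plain nearest)
def pvMask1 (t : Nat) (m : List (List Int)) : List (List Int) :=
  (pvStepRange (t + 2) (2 * t - 1) 1).foldl
    (fun m i => (pvStepRange 0 (t - 1) 3).foldl (fun m j => pvFlip m i j) m) m

def pvMask2 (n t : Nat) (m : List (List Int)) : List (List Int) :=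
  (pvStepRange 0 n 1).foldl
    (fun m i => (pvStepRange (t + 2) (2 * t - 1) 3).foldl
      (fun m j => if i = t - 1 then m else pvFlip m i j) m) m

def pvMask3 (n t : Nat) (m : List (List Int)) : List (List Int) :=
  (pvStepRange (t + 2) n 1).foldl
    (fun m i => (pvStepRange (2 * t + 1) n 3).foldl (fun m j => pvFlip m i j) m) m

def MaskPattern010 (matrix : List (List Int)) : List (List Int) :=
  pvMask3 matrix.length ((matrix.length + 1) / 3)
    (pvMask2 matrix.length ((matrix.length + 1) / 3)
      (pvMask1 ((matrix.length + 1) / 3) matrix))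

-- ===== PORT B =====
-- the closed-form band predicate of B (also used, verbatim, by Pre_ below)
def pvPredB (n t i j : Nat) : Bool :=
  (decide (t + 2 ≤ i) && decide (i < 2 * t - 1) && decide (j < t - 1) && decide (j % 3 = 0)) ||
  (decide (t + 2 ≤ j) && decide (j < 2 * t - 1) && decide ((j - (t + 2)) % 3 = 0) && decide (i ≠ t - 1)) ||
  (decide (t + 2 ≤ i) && decide (2 * t + 1 ≤ j) && decide (j < n) && decide ((j - (2 * t + 1)) % 3 = 0))

-- Source B's inner loop: j counts along the row
def pvRowB (n t i : Nat) : Nat → List Int → List Int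
  | _, [] => []
  | j, x :: xs => (if pvPredB n t i j then PySem.Int.bxor x 1 else x) :: pvRowB n t i (j + 1) xs

-- Source B's outer loop: i counts along the rows
def pvRowsB (n t : Nat) : Nat → List (List Int) → List (List Int)
  | _, [] => []
  | i, row :: rest => pvRowB n t i 0 row :: pvRowsB n t (i + 1) rest

def MaskPattern010_alt (matrix : List (List Int)) : List (List Int) :=
  pvRowsB matrix.length ((matrix.length + 1) / 3) 0 matrix

-- ===== PRECONDITION & SPEC =====
-- Pre_: every cell the mask touches exists in its row — exactly the inputs on which the
-- Python A returns normally (on any other input A raises IndexError).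
def Pre_MaskPattern010 (matrix : List (List Int)) : Prop :=
  ∀ i < matrix.length, ∀ j < matrix.length,
    pvPredB matrix.length ((matrix.length + 1) / 3) i j = true → j < (matrix.getD i []).length

instance (matrix : List (List Int)) : Decidable (Pre_MaskPattern010 matrix) := by
  unfold Pre_MaskPattern010; infer_instance

def pvWitness_MaskPattern010 : List (List Int) :=
  [[0, 0, 0, 0], [0, 0, 0, 0], [0, 0, 0, 0], [0, 0, 0, 0]]

def Spec_MaskPattern010 (matrix : List (List Int)) (out : List (List Int)) : Prop := out = MaskPattern010_alt matrix
instance (matrix : List (List Int)) (out : List (List Int)) : Decidable (Spec_MaskPattern010 matrix out) := by unfold Spec_MaskPattern010; infer_instance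

-- ===== CLAIM (what is proved, stated in full; the proofs are below) =====
def Claim_equal_MaskPattern010 : Prop := ∀ (matrix : List (List Int)), Dom_MaskPattern010 matrix → Pre_MaskPattern010 matrix → Spec_MaskPattern010 matrix (MaskPattern010 matrix)

-- ===== LEMMAS AND PROOFS =====

def pvCell (m : List (List Int)) (r c : Nat) : Option Int :=
  m[r]?.bind (fun row => row[c]?)

theorem pvCell_flip (m : List (List Int)) (i j r c : Nat) :
    pvCell (pvFlip m i j) r c =
      if i = r ∧ j = c then (pvCell m r c).map (fun x => PySem.Int.bxor x 1) else pvCell m r c := by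
  unfold pvCell pvFlip
  by_cases hi : i = r
  · subst hi
    cases hm : m[i]? with
    | none => simp [hm]
    | some row =>
      by_cases hj : j = c
      · subst hj
        simp [hm]
      · simp [hm, hj]
  · simp [hi]

theorem pvCell_foldl_row (J : List Nat) (hJ : J.Nodup) (i : Nat) :
    ∀ (m : List (List Int)) (r c : Nat),
      pvCell (J.foldl (fun m j => pvFlip m i j) m) r c =
        if i = r ∧ c ∈ J then (pvCell m r c).map (fun x => PySem.Int.bxor x 1) else pvCell m r c := by
  induction J with
  | nil => intro m r c; simp
  | cons j rest ih =>
    intro m r c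
    obtain ⟨hjr, hrest⟩ := List.nodup_cons.mp hJ
    simp only [List.foldl_cons]
    rw [ih hrest, pvCell_flip]
    by_cases hi : i = r
    · subst hi
      by_cases hc : j = c
      · subst hc
        simp [hjr]
      · simp [hc, List.mem_cons, Ne.symm hc]
    · simp [hi]

theorem pvCell_foldl_block (I J : List Nat) (hI : I.Nodup) (hJ : J.Nodup) :
    ∀ (m : List (List Int)) (r c : Nat),
      pvCell (I.foldl (fun m i => J.foldl (fun m j => pvFlip m i j) m) m) r c =
        if r ∈ I ∧ c ∈ J then (pvCell m r c).map (fun x => PySem.Int.bxor x 1) else pvCell m r c := by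
  induction I with
  | nil => intro m r c; simp
  | cons i rest ih =>
    intro m r c
    obtain ⟨hir, hrest⟩ := List.nodup_cons.mp hI
    simp only [List.foldl_cons]
    rw [ih hrest, pvCell_foldl_row J hJ]
    by_cases hri : i = r
    · subst hri
      by_cases hc : c ∈ J <;> simp [hir, hc, List.mem_cons]
    · have hne : (r = i) = False := eq_false (fun h => hri h.symm)
      simp [hri, List.mem_cons, hne]

theorem pvFoldl_id {γ : Type} (J : List γ) (m : List (List Int)) :
    J.foldl (fun m _ => m) m = m := by
  induction J with
  | nil => rfl
  | cons j rest ih => rw [List.foldl_cons]; exact ih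

theorem pvCell_foldl_block_skip (e : Nat) (I J : List Nat) (hI : I.Nodup) (hJ : J.Nodup) :
    ∀ (m : List (List Int)) (r c : Nat),
      pvCell (I.foldl (fun m i => J.foldl (fun m j => if i = e then m else pvFlip m i j) m) m) r c =
        if r ∈ I ∧ r ≠ e ∧ c ∈ J then (pvCell m r c).map (fun x => PySem.Int.bxor x 1) else pvCell m r c := by
  induction I with
  | nil => intro m r c; simp
  | cons i rest ih =>
    intro m r c
    obtain ⟨hir, hrest⟩ := List.nodup_cons.mp hI
    simp only [List.foldl_cons]
    rw [ih hrest]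
    by_cases hie : i = e
    · subst hie
      have hid : (J.foldl (fun m j => if i = i then m else pvFlip m i j) m) = m := by
        have hfun : (fun (m : List (List Int)) (j : Nat) => if i = i then m else pvFlip m i j)
            = fun m _ => m := by funext m j; simp
        rw [hfun]; exact pvFoldl_id J m
      rw [hid]
      by_cases hre : r = i
      · simp [hre]
      · simp [List.mem_cons, hre]
    · have hbody : (fun (m : List (List Int)) (j : Nat) => if i = e then m else pvFlip m i j)
          = fun m j => pvFlip m i j := by funext m j; simp [hie]
      rw [hbody, pvCell_foldl_row J hJ]
      by_cases hri : i = r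
      · subst hri
        by_cases hc : c ∈ J <;> simp [hir, hc, List.mem_cons, hie]
      · have hne : (r = i) = False := eq_false (fun h => hri h.symm)
        simp [hri, List.mem_cons, hne]

theorem mem_pvStepRange1 (a b x : Nat) : x ∈ pvStepRange a b 1 ↔ a ≤ x ∧ x < b := by
  simp only [pvStepRange, List.mem_map, List.mem_range]
  constructor
  · rintro ⟨k, hk, rfl⟩; omega
  · intro h; exact ⟨x - a, by omega, by omega⟩

theorem mem_pvStepRange3 (a b x : Nat) :
    x ∈ pvStepRange a b 3 ↔ a ≤ x ∧ x < b ∧ (x - a) % 3 = 0 := by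
  simp only [pvStepRange, List.mem_map, List.mem_range]
  constructor
  · rintro ⟨k, hk, rfl⟩; omega
  · intro h; exact ⟨(x - a) / 3, by omega, by omega⟩

theorem nodup_pvStepRange (a b s : Nat) (hs : 0 < s) : (pvStepRange a b s).Nodup := by
  unfold pvStepRange
  refine List.Nodup.map ?_ (List.nodup_range)
  intro x y h
  have h' : s * x = s * y := Nat.add_left_cancel h
  exact Nat.eq_of_mul_eq_mul_left hs h'

theorem pvCell_mask1 (t : Nat) (m : List (List Int)) (r c : Nat) :
    pvCell (pvMask1 t m) r c =
      if r ∈ pvStepRange (t + 2) (2 * t - 1) 1 ∧ c ∈ pvStepRange 0 (t - 1) 3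
      then (pvCell m r c).map (fun x => PySem.Int.bxor x 1) else pvCell m r c := by
  unfold pvMask1
  exact pvCell_foldl_block _ _ (nodup_pvStepRange _ _ _ (by omega)) (nodup_pvStepRange _ _ _ (by omega)) m r c

theorem pvCell_mask2 (n t : Nat) (m : List (List Int)) (r c : Nat) :
    pvCell (pvMask2 n t m) r c =
      if r ∈ pvStepRange 0 n 1 ∧ r ≠ t - 1 ∧ c ∈ pvStepRange (t + 2) (2 * t - 1) 3
      then (pvCell m r c).map (fun x => PySem.Int.bxor x 1) else pvCell m r c := by
  unfold pvMask2
  exact pvCell_foldl_block_skip _ _ _ (nodup_pvStepRange _ _ _ (by omega)) (nodup_pvStepRange _ _ _ (by omega)) m r c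

theorem pvCell_mask3 (n t : Nat) (m : List (List Int)) (r c : Nat) :
    pvCell (pvMask3 n t m) r c =
      if r ∈ pvStepRange (t + 2) n 1 ∧ c ∈ pvStepRange (2 * t + 1) n 3
      then (pvCell m r c).map (fun x => PySem.Int.bxor x 1) else pvCell m r c := by
  unfold pvMask3
  exact pvCell_foldl_block _ _ (nodup_pvStepRange _ _ _ (by omega)) (nodup_pvStepRange _ _ _ (by omega)) m r c

theorem pvCell_A (m : List (List Int)) (r c : Nat) :
    pvCell (MaskPattern010 m) r c =
      (pvCell m r c).map
        (fun x => if pvPredB m.length ((m.length + 1) / 3) r c then PySem.Int.bxor x 1 else x) := by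
  unfold MaskPattern010
  rw [pvCell_mask3, pvCell_mask2, pvCell_mask1]
  simp only [mem_pvStepRange1, mem_pvStepRange3]
  cases hx : pvCell m r c with
  | none => split_ifs <;> simp
  | some x =>
    have hr : r < m.length := by
      by_contra h
      have hnone : m[r]? = none := by
        rw [List.getElem?_eq_none_iff]; omega
      unfold pvCell at hx
      rw [hnone] at hx
      simp at hx
    simp only [pvPredB, Bool.or_eq_true, Bool.and_eq_true, decide_eq_true_eq, Option.map_some]
    split_ifs <;> first | rfl | (exfalso; omega)

theorem pvRowB_getElem? (n t i : Nat) (row : List Int) :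
    ∀ (j c : Nat), (pvRowB n t i j row)[c]? =
      row[c]?.map (fun x => if pvPredB n t i (j + c) then PySem.Int.bxor x 1 else x) := by
  induction row with
  | nil => intro j c; simp [pvRowB]
  | cons x xs ih =>
    intro j c
    cases c with
    | zero => simp [pvRowB]
    | succ c' =>
      have harith : j + (c' + 1) = (j + 1) + c' := by omega
      simp [pvRowB, ih (j + 1) c', harith]

theorem pvRowsB_getElem? (n t : Nat) (m : List (List Int)) :
    ∀ (i r : Nat), (pvRowsB n t i m)[r]? =
      m[r]?.map (fun row => pvRowB n t (i + r) 0 row) := by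
  induction m with
  | nil => intro i r; simp [pvRowsB]
  | cons row rest ih =>
    intro i r
    cases r with
    | zero => simp [pvRowsB]
    | succ r' =>
      have harith : i + (r' + 1) = (i + 1) + r' := by omega
      simp [pvRowsB, ih (i + 1) r', harith]

theorem pvCell_alt (m : List (List Int)) (r c : Nat) :
    pvCell (MaskPattern010_alt m) r c =
      (pvCell m r c).map
        (fun x => if pvPredB m.length ((m.length + 1) / 3) r c then PySem.Int.bxor x 1 else x) := by
  unfold MaskPattern010_alt pvCell
  rw [pvRowsB_getElem?]
  cases hm : m[r]? with
  | none => simp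
  | some row =>
    simp only [Option.map_some, Option.bind_some]
    rw [pvRowB_getElem?]
    simp

theorem length_foldl_pres {α : Type} (f : List (List Int) → α → List (List Int))
    (h : ∀ m a, (f m a).length = m.length) :
    ∀ (l : List α) (m : List (List Int)), (l.foldl f m).length = m.length := by
  intro l
  induction l with
  | nil => intro m; rfl
  | cons a rest ih => intro m; rw [List.foldl_cons, ih, h]

theorem length_pvFlip (m : List (List Int)) (i j : Nat) : (pvFlip m i j).length = m.length := by
  simp [pvFlip]

theorem length_A (m : List (List Int)) : (MaskPattern010 m).length = m.length := by
  unfold MaskPattern010 pvMask3 pvMask2 pvMask1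
  rw [length_foldl_pres _ (fun m i => length_foldl_pres _ (fun m' j => length_pvFlip m' i j) _ m)]
  rw [length_foldl_pres _ (fun m i => length_foldl_pres _ (fun m' j => by
        split
        · rfl
        · exact length_pvFlip m' i j) _ m)]
  rw [length_foldl_pres _ (fun m i => length_foldl_pres _ (fun m' j => length_pvFlip m' i j) _ m)]

theorem length_pvRowsB (n t : Nat) (m : List (List Int)) :
    ∀ i, (pvRowsB n t i m).length = m.length := by
  induction m with
  | nil => intro i; rfl
  | cons row rest ih => intro i; simp [pvRowsB, ih]

theorem length_alt (m : List (List Int)) : (MaskPattern010_alt m).length = m.length := by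
  unfold MaskPattern010_alt
  exact length_pvRowsB _ _ _ _

theorem ports_eq (m : List (List Int)) : MaskPattern010 m = MaskPattern010_alt m := by
  apply List.ext_getElem?
  intro r
  by_cases hr : r < m.length
  · have h1 : r < (MaskPattern010 m).length := by rw [length_A]; exact hr
    have h2 : r < (MaskPattern010_alt m).length := by rw [length_alt]; exact hr
    rw [List.getElem?_eq_getElem h1, List.getElem?_eq_getElem h2]
    congr 1
    apply List.ext_getElem?
    intro c
    have hA : pvCell (MaskPattern010 m) r c = ((MaskPattern010 m)[r]'h1)[c]? := by
      unfold pvCell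
      rw [List.getElem?_eq_getElem h1]
      rfl
    have hB : pvCell (MaskPattern010_alt m) r c = ((MaskPattern010_alt m)[r]'h2)[c]? := by
      unfold pvCell
      rw [List.getElem?_eq_getElem h2]
      rfl
    rw [← hA, ← hB, pvCell_A, pvCell_alt]
  · rw [List.getElem?_eq_none_iff.mpr (by rw [length_A]; omega),
        List.getElem?_eq_none_iff.mpr (by rw [length_alt]; omega)]

-- ===== VERDICT (by name: the statement is the Claim_ definition above) =====
theorem MaskPattern010_spec : Claim_equal_MaskPattern010 := by
  intro matrix _ _
  unfold Spec_MaskPattern010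
  exact ports_eq matrix
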